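-- pv_equiv track=rewrite | github.com/kthfre/elektro-chat | rasa_elektro/actions/util.py | list_to_comma_separated_segment
-- ===== SOURCE A (Python) =====
-- def list_to_comma_separated_segment(word_list):
--   final_string = ""
--
--   if len(word_list) == 1:
--     return word_list[0]
--
--   for i, word in enumerate(word_list):
--     if not i == len(word_list) - 1:
--       final_string += word + ", " if i != len(word_list) - 2 else word + " "
--     else:
--       final_string += "och " + word
--
--   return final_string
-- ===== SOURCE B (Python) =====
-- def list_to_comma_separated_segment(word_list):
--     if not word_list:
--         return ""
--     if len(word_list) == 1:
--         return word_list[0]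
--     return ", ".join(word_list[:-1]) + " och " + word_list[-1]
-- ===== Notes on version B (the rewrite author's own statement) =====
-- stated objective: simpler
-- what changed: Replaces the index-accumulating loop with per-index comparisons against len-1/len-2 by two guards plus a prefix join (', '.join(word_list[:-1])) and a constant ' och ' + last suffix.
import Mathlib
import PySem

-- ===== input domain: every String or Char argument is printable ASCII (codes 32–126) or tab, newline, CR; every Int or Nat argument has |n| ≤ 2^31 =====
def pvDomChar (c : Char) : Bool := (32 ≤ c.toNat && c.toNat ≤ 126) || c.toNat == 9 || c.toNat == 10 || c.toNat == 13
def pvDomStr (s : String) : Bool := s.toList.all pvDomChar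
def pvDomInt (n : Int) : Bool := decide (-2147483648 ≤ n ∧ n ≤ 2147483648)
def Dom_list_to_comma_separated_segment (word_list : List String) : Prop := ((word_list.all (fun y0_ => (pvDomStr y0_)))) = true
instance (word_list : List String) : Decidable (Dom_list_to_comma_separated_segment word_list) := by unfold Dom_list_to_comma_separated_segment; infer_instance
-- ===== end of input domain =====

-- B joins the prefix word_list[:-1] with ", " and appends a constant " och " + last
-- suffix, replacing A's per-index loop that compares each index with len-1/len-2 (simpler).

-- ===== PORT A =====
def list_to_comma_separated_segment (word_list : List String) : String :=
  if word_list.length = 1 then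
    (PySem.List.pyGet? word_list 0).getD ""   -- word_list[0]; cannot be none since length = 1
  else
    (PySem.List.enumerate word_list 0).foldl
      (fun final_string p =>
        if ¬ (p.1 = (word_list.length : Int) - 1) then
          final_string ++ (if p.1 ≠ (word_list.length : Int) - 2 then p.2 ++ ", " else p.2 ++ " ")
        else
          final_string ++ ("och " ++ p.2)) ""

-- ===== PORT B =====
def list_to_comma_separated_segment_alt (word_list : List String) : String :=
  if word_list = [] then ""
  else if word_list.length = 1 then
    (PySem.List.pyGet? word_list 0).getD ""   -- word_list[0]; cannot be none since length = 1
  else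
    PySem.Str.join ", " (PySem.List.slice word_list none (some (-1))) ++ " och "
      ++ (PySem.List.pyGet? word_list (-1)).getD ""   -- word_list[-1]; cannot be none: list nonempty

-- ===== PRECONDITION & SPEC =====
def Spec_list_to_comma_separated_segment (word_list : List String) (out : String) : Prop := out = list_to_comma_separated_segment_alt word_list
instance (word_list : List String) (out : String) : Decidable (Spec_list_to_comma_separated_segment word_list out) := by unfold Spec_list_to_comma_separated_segment; infer_instance

-- ===== CLAIM (what is proved, stated in full; the proofs are below) =====
def Claim_equal_list_to_comma_separated_segment : Prop := ∀ (word_list : List String), Dom_list_to_comma_separated_segment word_list → Spec_list_to_comma_separated_segment word_list (list_to_comma_separated_segment word_list)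

-- ===== LEMMAS AND PROOFS =====

/-- The comma-suffixed prefix as a character list. -/
def prefCh (xs : List String) : List Char :=
  (xs.map (fun w => w.toList ++ [',', ' '])).flatten

/-- Chars.join of a list ending in `c` is the comma-suffixed prefix followed by `c`. -/
lemma joinCh (sep : List Char) (l : List (List Char)) (c : List Char) :
    PySem.Chars.join sep (l ++ [c]) = (l.map (· ++ sep)).flatten ++ c := by
  induction l with
  | nil => simp [PySem.Chars.join_singleton]
  | cons a l ih =>
    rcases hl : l ++ [c] with _ | ⟨b, t⟩
    · cases l <;> simp at hl
    · rw [List.cons_append, hl, PySem.Chars.join_cons_cons, ← hl, ih]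
      simp

/-- A's loop over indices strictly below `N - 2` appends `word ++ ", "` each step. -/
lemma foldA (N : Int) (xs : List String) (s : Int) (acc : String)
    (h : s + xs.length ≤ N - 2) :
    ((PySem.List.enumerate xs s).foldl
      (fun final_string p =>
        if ¬ (p.1 = N - 1) then
          final_string ++ (if p.1 ≠ N - 2 then p.2 ++ ", " else p.2 ++ " ")
        else
          final_string ++ ("och " ++ p.2)) acc).toList = acc.toList ++ prefCh xs := by
  induction xs generalizing s acc with
  | nil => simp [PySem.List.enumerate, prefCh]
  | cons x xs ih =>
    rw [PySem.List.enumerate_cons, List.foldl_cons]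
    have hlen : (0 : Int) ≤ xs.length := by positivity
    simp only [List.length_cons] at h
    push_cast at h
    have h1 : ¬ (s = N - 1) := by omega
    have h2 : s ≠ N - 2 := by omega
    rw [if_pos h1, if_pos h2, ih (s + 1) _ (by omega)]
    simp [prefCh]

/-- The main case: a list with at least two elements, written as `xs ++ [y, z]`. -/
lemma key (xs : List String) (y z : String) :
    list_to_comma_separated_segment (xs ++ [y, z]) =
    list_to_comma_separated_segment_alt (xs ++ [y, z]) := by
  apply String.toList_inj.mp
  have hne : xs ++ [y, z] ≠ [] := by simp
  have hlen : (xs ++ [y, z]).length = xs.length + 2 := by simp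
  unfold list_to_comma_separated_segment list_to_comma_separated_segment_alt
  rw [if_neg (by omega), if_neg hne, if_neg (by omega)]
  -- A side: split the enumeration after the prefix `xs`
  have hsplit : (xs ++ [y, z]) = (xs ++ [y]) ++ [z] := by simp
  rw [PySem.List.enumerate_append, List.foldl_append]
  set N : Int := ((xs ++ [y, z]).length : Int) with hN
  have hN' : N = (xs.length : Int) + 2 := by rw [hN, hlen]; push_cast; ring
  -- the two last steps of A's loop
  rw [show PySem.List.enumerate [y, z] ((0 : Int) + xs.length) =
      [((xs.length : Int), y), ((xs.length : Int) + 1, z)] by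
    simp [PySem.List.enumerate]]
  have c1 : ¬ ((xs.length : Int) = N - 1) := by omega
  have c2 : ¬ ((xs.length : Int) ≠ N - 2) := by omega
  have c3 : ¬ ¬ ((xs.length : Int) + 1 = N - 1) := by omega
  simp only [List.foldl_cons, List.foldl_nil]
  rw [if_pos c1, if_neg c2, if_neg c3]
  -- B side: slice and last element
  rw [PySem.List.slice_to_neg_one, PySem.List.pyGet?_neg_one, hsplit,
      List.dropLast_concat, List.getLast?_concat, Option.getD_some]
  simp only [String.toList_append, PySem.Str.toList_join, List.map_append, List.map_cons,
    List.map_nil]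
  rw [foldA N xs 0 "" (by omega), joinCh]
  simp [prefCh, Function.comp_def]

-- ===== VERDICT (by name: the statement is the Claim_ definition above) =====
theorem list_to_comma_separated_segment_spec : Claim_equal_list_to_comma_separated_segment := by
  intro word_list _
  unfold Spec_list_to_comma_separated_segment
  induction word_list using List.reverseRecOn with
  | nil => rfl
  | append_singleton ys z _ =>
    induction ys using List.reverseRecOn with
    | nil => rfl
    | append_singleton xs y _ =>
      rw [show (xs ++ [y]) ++ [z] = xs ++ [y, z] by simp]
      exact key xs y z
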